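-- pv_equiv track=rewrite | github.com/nishio/atcoder | hhkb2020/d.py | blute
-- ===== SOURCE A (Python) =====
-- def blute(N, A, B):
--     ret = 0
--     for ax in range(0, N - A + 1):
--         for ay in range(0, N - A + 1):
--             for bx in range(0, N - B + 1):
--                 for by in range(0, N - B + 1):
--                     if ax <= bx < ax + A or ax < bx + B <= ax + A:
--                         if ay <= by < ay + A or ay < by + B <= ay + A:
--                             continue
--                     ret += 1
--     return ret
-- ===== SOURCE B (Python) =====
-- def blute(N, A, B):
--     # Overlap is separable per axis and depends only on d = bx - ax, so the
--     # answer is P*P*M*M - ov*ov where ov counts lattice points of the P x M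
--     # rectangle lying in two diagonal bands; each band count is a difference
--     # of triangular-number prefix sums, computed without loops.
--     P = max(0, N - A + 1)
--     M = max(0, N - B + 1)
--
--     def tri(n):
--         return n * (n + 1) // 2
--
--     def phi(v):
--         # sum over k = 1..v of clamp(k, 0, M)
--         if v <= 0:
--             return 0
--         if v <= M:
--             return tri(v)
--         return tri(M) + M * (v - M)
--
--     def ramp(t):
--         # sum over ax = 0..P-1 of clamp(ax + t, 0, M)
--         return phi(t + P - 1) - phi(t - 1)
--
--     def band(l, u):
--         # number of (ax, bx), 0 <= ax < P, 0 <= bx < M, with l <= bx - ax <= u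
--         if l > u:
--             return 0
--         return ramp(u + 1) - ramp(l)
--
--     ov = band(0, A - 1) + band(1 - B, A - B) - band(max(0, 1 - B), min(A - 1, A - B))
--     return P * P * M * M - ov * ov
-- ===== Notes on version B (the rewrite author's own statement) =====
-- stated objective: alternative
-- what changed: The overlap test is separable per axis and depends only on bx-ax, so the quadruple loop is replaced by closed-form lattice-point counts of diagonal bands (triangular-number prefix sums): answer = P*P*M*M - ov*ov, computed without loops.
import Mathlib
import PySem

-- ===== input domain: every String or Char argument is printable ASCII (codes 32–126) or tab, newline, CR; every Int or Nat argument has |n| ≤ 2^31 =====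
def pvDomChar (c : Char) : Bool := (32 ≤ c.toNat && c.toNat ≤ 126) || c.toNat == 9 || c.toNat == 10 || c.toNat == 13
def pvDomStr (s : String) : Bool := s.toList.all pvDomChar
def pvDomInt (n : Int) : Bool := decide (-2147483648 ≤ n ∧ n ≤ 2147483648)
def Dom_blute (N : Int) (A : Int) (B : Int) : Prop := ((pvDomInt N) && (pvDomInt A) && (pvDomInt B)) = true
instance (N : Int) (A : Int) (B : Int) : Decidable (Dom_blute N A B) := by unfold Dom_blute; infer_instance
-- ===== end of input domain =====

-- B replaces A's quadruple loop by closed-form band counts (the overlap test is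
-- separable per axis and depends only on bx - ax): a loop-free alternative.

-- ===== PORT A =====
def blute (N : Int) (A : Int) (B : Int) : Int :=
  (PySem.List.pyRange 0 (N - A + 1) 1).foldl (fun ret ax =>
    (PySem.List.pyRange 0 (N - A + 1) 1).foldl (fun ret ay =>
      (PySem.List.pyRange 0 (N - B + 1) 1).foldl (fun ret bx =>
        (PySem.List.pyRange 0 (N - B + 1) 1).foldl (fun ret b_y =>
          if ((ax ≤ bx ∧ bx < ax + A) ∨ (ax < bx + B ∧ bx + B ≤ ax + A)) ∧
             ((ay ≤ b_y ∧ b_y < ay + A) ∨ (ay < b_y + B ∧ b_y + B ≤ ay + A)) then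
            ret
          else ret + 1) ret) ret) ret) 0

-- ===== PORT B =====
-- helper tri(n) = n * (n + 1) // 2
def pvTri (n : Int) : Int := PySem.Int.floordiv (n * (n + 1)) 2

-- helper phi(v) = sum over k = 1..v of clamp(k, 0, M)
def pvPhi (M : Int) (v : Int) : Int :=
  if v ≤ 0 then 0 else if v ≤ M then pvTri v else pvTri M + M * (v - M)

-- helper ramp(t) = sum over ax = 0..P-1 of clamp(ax + t, 0, M)
def pvRamp (P : Int) (M : Int) (t : Int) : Int := pvPhi M (t + P - 1) - pvPhi M (t - 1)

-- helper band(l, u) = #{(ax, bx) | 0 ≤ ax < P, 0 ≤ bx < M, l ≤ bx - ax ≤ u}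
def pvBand (P : Int) (M : Int) (l : Int) (u : Int) : Int :=
  if l > u then 0 else pvRamp P M (u + 1) - pvRamp P M l

def blute_alt (N : Int) (A : Int) (B : Int) : Int :=
  let P := max 0 (N - A + 1)
  let M := max 0 (N - B + 1)
  let ov := pvBand P M 0 (A - 1) + pvBand P M (1 - B) (A - B)
              - pvBand P M (max 0 (1 - B)) (min (A - 1) (A - B))
  P * P * M * M - ov * ov

-- ===== PRECONDITION & SPEC =====
def Spec_blute (N : Int) (A : Int) (B : Int) (out : Int) : Prop := out = blute_alt N A B
instance (N : Int) (A : Int) (B : Int) (out : Int) : Decidable (Spec_blute N A B out) := by unfold Spec_blute; infer_instance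

-- ===== CLAIM (what is proved, stated in full; the proofs are below) =====
def Claim_equal_blute : Prop := ∀ (N : Int) (A : Int) (B : Int), Dom_blute N A B → Spec_blute N A B (blute N A B)

-- ===== LEMMAS AND PROOFS =====

/-- 0/1 indicator of a decidable proposition. -/
def pvInd (P : Prop) [Decidable P] : Int := if P then 1 else 0

/-- clamp x to [0, m]. -/
def pvClamp (m : Int) (x : Int) : Int := max 0 (min x m)

/-- The innermost loop of A: adds 1 unless `CX ∧ CY y`. -/
theorem pv_foldl_by (R : List Int) (CX : Prop) [Decidable CX]
    (CY : Int → Prop) [DecidablePred CY] (init : Int) :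
    R.foldl (fun ret y => if CX ∧ CY y then ret else ret + 1) init
      = init + ((R.length : Int) - pvInd CX * (R.map (fun y => pvInd (CY y))).sum) := by
  induction R generalizing init with
  | nil => simp
  | cons a l ih =>
    simp only [List.foldl_cons, ih, List.length_cons, List.map_cons, List.sum_cons]
    by_cases hx : CX <;> by_cases hy : CY a <;>
      simp only [pvInd, hx, hy, if_pos, and_true, and_false] <;> push_cast <;> ring

theorem pv_sum_affine_r (l : List Int) (f : Int → Int) (c k : Int) :
    (l.map (fun x => c - f x * k)).sum = (l.length : Int) * c - (l.map f).sum * k := by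
  induction l with
  | nil => simp
  | cons a t ih => simp only [List.map_cons, List.sum_cons, List.length_cons, ih]; push_cast; ring

theorem pv_sum_affine_l (l : List Int) (f : Int → Int) (c k : Int) :
    (l.map (fun x => c - k * f x)).sum = (l.length : Int) * c - k * (l.map f).sum := by
  induction l with
  | nil => simp
  | cons a t ih => simp only [List.map_cons, List.sum_cons, List.length_cons, ih]; push_cast; ring

theorem pv_sum_map_sub (l : List Int) (f g : Int → Int) :
    (l.map (fun x => f x - g x)).sum = (l.map f).sum - (l.map g).sum := by
  induction l with
  | nil => simp
  | cons a t ih => simp only [List.map_cons, List.sum_cons, ih]; ring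

theorem pv_sum_map_add3 (l : List Int) (f g h : Int → Int) :
    (l.map (fun x => f x + g x - h x)).sum = (l.map f).sum + (l.map g).sum - (l.map h).sum := by
  induction l with
  | nil => simp
  | cons a t ih => simp only [List.map_cons, List.sum_cons, ih]; ring

theorem pv_pyRange_zero_max (a : Int) :
    PySem.List.pyRange 0 (max 0 a) 1 = PySem.List.pyRange 0 a 1 := by
  rcases le_total 0 a with h | h
  · rw [max_eq_right h]
  · rw [max_eq_left h, PySem.List.pyRange_one_eq_nil h, PySem.List.pyRange_one_eq_nil le_rfl]

theorem pv_len_pyRange (a : Int) :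
    ((PySem.List.pyRange 0 a 1).length : Int) = max 0 a := by
  rw [PySem.List.length_pyRange_one, sub_zero, Int.toNat_eq_max, max_comm]

theorem pv_ind_or (p q : Prop) [Decidable p] [Decidable q] :
    pvInd (p ∨ q) = pvInd p + pvInd q - pvInd (p ∧ q) := by
  by_cases hp : p <;> by_cases hq : q <;> simp [pvInd, hp, hq]

theorem pv_ind_congr {p q : Prop} [Decidable p] [Decidable q] (h : p ↔ q) :
    pvInd p = pvInd q := by simp [pvInd, h]

/-- triangular-number step. -/
theorem pv_tri_step (v : Int) : pvTri v = pvTri (v - 1) + v := by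
  unfold pvTri
  rw [show (v - 1) * (v - 1 + 1) = (v - 1) * v by ring,
      PySem.Int.floordiv_eq_ediv_of_pos (by norm_num : (0:Int) < 2),
      PySem.Int.floordiv_eq_ediv_of_pos (by norm_num : (0:Int) < 2),
      show v * (v + 1) = (v - 1) * v + v * 2 by ring,
      Int.add_mul_ediv_right _ _ (by norm_num : (2:Int) ≠ 0)]

/-- phi step: phi v - phi (v-1) = clamp(v, 0, M). -/
theorem pv_phi_step (M v : Int) (hM : 0 ≤ M) :
    pvPhi M v = pvPhi M (v - 1) + pvClamp M v := by
  by_cases h0 : v ≤ 0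
  · have e1 : pvPhi M v = 0 := by simp [pvPhi, h0]
    have e2 : pvPhi M (v - 1) = 0 := by simp [pvPhi, show v - 1 ≤ 0 by omega]
    rw [e1, e2]; simp [pvClamp]; omega
  · by_cases h1 : v ≤ M
    · have ec : pvClamp M v = v := by simp [pvClamp]; omega
      have e1 : pvPhi M v = pvTri v := by simp [pvPhi, h0, h1]
      by_cases h2 : v - 1 ≤ 0
      · have hv : v = 1 := by omega
        subst hv
        have ht1 : pvTri 1 = 1 := by decide
        have e2 : pvPhi M (1 - 1) = 0 := by simp [pvPhi]
        rw [e1, e2, ec, ht1]; ring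
      · have e2 : pvPhi M (v - 1) = pvTri (v - 1) := by
          simp [pvPhi, h2, show v - 1 ≤ M by omega]
        rw [e1, e2, ec, pv_tri_step v]
    · have ec : pvClamp M v = M := by simp [pvClamp]; omega
      have e1 : pvPhi M v = pvTri M + M * (v - M) := by simp [pvPhi, h0, h1]
      by_cases h2 : v - 1 ≤ 0
      · have hv : v = 1 := by omega
        have hm0 : M = 0 := by omega
        subst hv; subst hm0
        have ht0 : pvTri 0 = 0 := by decide
        have e2 : pvPhi 0 (1 - 1) = 0 := by simp [pvPhi]
        rw [e1, e2, ec, ht0]; ring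
      · by_cases h3 : v - 1 ≤ M
        · have e2 : pvPhi M (v - 1) = pvTri (v - 1) := by simp [pvPhi, h2, h3]
          rw [e1, e2, ec, show v - 1 = M by omega, show M * (v - M) = M by
            rw [show v = M + 1 by omega]; ring]
        · have e2 : pvPhi M (v - 1) = pvTri M + M * (v - 1 - M) := by simp [pvPhi, h2, h3]
          rw [e1, e2, ec]
          have hmul : M * (v - M) = M * (v - 1 - M) + M := by ring
          omega

/-- sum of clamp over a range (B's ramp). -/
theorem pv_sum_clamp (M P t : Int) (hM : 0 ≤ M) (hP : 0 ≤ P) :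
    ((PySem.List.pyRange 0 P 1).map (fun a => pvClamp M (a + t))).sum
      = pvPhi M (t + P - 1) - pvPhi M (t - 1) := by
  induction P, hP using Int.le_induction with
  | base =>
    rw [PySem.List.pyRange_one_eq_nil le_rfl, show t + (0:Int) - 1 = t - 1 by ring]
    simp
  | succ n hn ih =>
    rw [PySem.List.pyRange_one_succ_right hn, List.map_append, List.sum_append]
    simp only [List.map_cons, List.map_nil, List.sum_cons, List.sum_nil]
    have hstep := pv_phi_step M (t + n) hM
    rw [show t + (n + 1) - 1 = t + n by ring, show n + t = t + n by ring]
    omega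

/-- 1-D interval count as a clamp difference. -/
theorem pv_sum_ind (m α β : Int) (h : α ≤ β + 1) :
    ((PySem.List.pyRange 0 m 1).map (fun b => pvInd (α ≤ b ∧ b ≤ β))).sum
      = pvClamp m (β + 1) - pvClamp m α := by
  by_cases hm : 0 ≤ m
  · induction m, hm using Int.le_induction with
    | base =>
      rw [PySem.List.pyRange_one_eq_nil le_rfl]
      simp only [List.map_nil, List.sum_nil]
      unfold pvClamp; omega
    | succ n hn ih =>
      rw [PySem.List.pyRange_one_succ_right hn, List.map_append, List.sum_append, ih]
      simp only [List.map_cons, List.map_nil, List.sum_cons, List.sum_nil]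
      unfold pvInd pvClamp
      split_ifs <;> omega
  · rw [PySem.List.pyRange_one_eq_nil (by omega)]
    simp only [List.map_nil, List.sum_nil]
    unfold pvClamp; omega

/-- 2-D band count equals B's pvBand. -/
theorem pv_sum_band (P m l u : Int) (hP : 0 ≤ P) (hm : 0 ≤ m) :
    ((PySem.List.pyRange 0 P 1).map (fun a =>
      ((PySem.List.pyRange 0 m 1).map (fun b => pvInd (a + l ≤ b ∧ b ≤ a + u))).sum)).sum
      = pvBand P m l u := by
  by_cases hlu : u < l
  · rw [pvBand, if_pos (by omega : l > u)]
    apply List.sum_eq_zero; intro x hx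
    simp only [List.mem_map] at hx; obtain ⟨a, _, rfl⟩ := hx
    apply List.sum_eq_zero; intro y hy
    simp only [List.mem_map] at hy; obtain ⟨b, _, rfl⟩ := hy
    simp only [pvInd, if_neg (show ¬(a + l ≤ b ∧ b ≤ a + u) by omega)]
  · have hs : ∀ a : Int,
        ((PySem.List.pyRange 0 m 1).map (fun b => pvInd (a + l ≤ b ∧ b ≤ a + u))).sum
          = pvClamp m (a + u + 1) - pvClamp m (a + l) :=
      fun a => pv_sum_ind m (a + l) (a + u) (by omega)
    simp only [hs]
    rw [pv_sum_map_sub (PySem.List.pyRange 0 P 1)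
          (fun a => pvClamp m (a + u + 1)) (fun a => pvClamp m (a + l))]
    simp only [show ∀ a : Int, a + u + 1 = a + (u + 1) from fun a => by ring]
    rw [pv_sum_clamp m P (u + 1) hm hP, pv_sum_clamp m P l hm hP,
        pvBand, if_neg (by omega)]
    rfl

/-- The double 0/1 sum produced by flattening A equals B's band arithmetic. -/
theorem pv_S_eq (N A B : Int) :
    ((PySem.List.pyRange 0 (N - A + 1) 1).map (fun ax =>
      ((PySem.List.pyRange 0 (N - B + 1) 1).map (fun bx =>
        pvInd ((ax ≤ bx ∧ bx < ax + A) ∨ (ax < bx + B ∧ bx + B ≤ ax + A)))).sum)).sum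
      = pvBand (max 0 (N - A + 1)) (max 0 (N - B + 1)) 0 (A - 1)
        + pvBand (max 0 (N - A + 1)) (max 0 (N - B + 1)) (1 - B) (A - B)
        - pvBand (max 0 (N - A + 1)) (max 0 (N - B + 1)) (max 0 (1 - B)) (min (A - 1) (A - B)) := by
  have hr1 : PySem.List.pyRange 0 (N - A + 1) 1
      = PySem.List.pyRange 0 (max 0 (N - A + 1)) 1 := (pv_pyRange_zero_max _).symm
  have hr2 : PySem.List.pyRange 0 (N - B + 1) 1
      = PySem.List.pyRange 0 (max 0 (N - B + 1)) 1 := (pv_pyRange_zero_max _).symm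
  rw [hr1, hr2]
  have c1 : ∀ a b : Int, pvInd (a ≤ b ∧ b < a + A) = pvInd (a + 0 ≤ b ∧ b ≤ a + (A - 1)) :=
    fun a b => pv_ind_congr (by omega)
  have c2 : ∀ a b : Int,
      pvInd (a < b + B ∧ b + B ≤ a + A) = pvInd (a + (1 - B) ≤ b ∧ b ≤ a + (A - B)) :=
    fun a b => pv_ind_congr (by omega)
  have c3 : ∀ a b : Int,
      pvInd ((a ≤ b ∧ b < a + A) ∧ (a < b + B ∧ b + B ≤ a + A))
        = pvInd (a + max 0 (1 - B) ≤ b ∧ b ≤ a + min (A - 1) (A - B)) :=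
    fun a b => pv_ind_congr (by omega)
  simp only [pv_ind_or, c1, c2, c3, pv_sum_map_add3]
  rw [pv_sum_band _ _ 0 (A - 1) (le_max_left _ _) (le_max_left _ _),
      pv_sum_band _ _ (1 - B) (A - B) (le_max_left _ _) (le_max_left _ _),
      pv_sum_band _ _ (max 0 (1 - B)) (min (A - 1) (A - B)) (le_max_left _ _) (le_max_left _ _)]

-- ===== VERDICT (by name: the statement is the Claim_ definition above) =====
theorem blute_spec : Claim_equal_blute := by
  intro N A B _
  unfold Spec_blute blute
  simp only [pv_foldl_by, PySem.List.foldl_add, pv_sum_affine_r, pv_sum_affine_l, pv_len_pyRange]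
  simp only [blute_alt]
  rw [← pv_S_eq N A B]
  ring
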